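-- pv_equiv track=rewrite | github.com/hbkeshavakrishnan/keshava_cp | 09-shortenlongruns-Python/shortenlongruns.py | shortenlongruns
-- ===== SOURCE A (Python) =====
-- def shortenlongruns(n, k):
-- 	if n == []:
-- 		return []
-- 	res = []
-- 	z = 0
-- 	while z < len(n):
-- 		c=0
-- 		for i in range(k):
-- 			if z + i < len(n):
-- 				if(n[z]==n[z+i]):
-- 					c+=1
-- 		if(c==k):
-- 			n.pop(z)
-- 			continue
-- 		z+=1
-- 	return n
-- ===== SOURCE B (Python) =====
-- def shortenlongruns(n, k):
--     out = []
--     run = 0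
--     prev = None
--     for x in n:
--         run = run + 1 if x == prev else 1
--         prev = x
--         if run <= k - 1:
--             out.append(x)
--     return out
-- ===== Notes on version B (the rewrite author's own statement) =====
-- stated objective: faster
-- what changed: A repeatedly rescans and pops inside the list until every run is short; B makes one linear pass tracking the current run length and keeps an element only while that length is at most k-1.
-- outside the precondition, e.g. on shortenlongruns([1, 2, 2], -1): A returns [1, 2, 2], B returns []
import Mathlib
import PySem

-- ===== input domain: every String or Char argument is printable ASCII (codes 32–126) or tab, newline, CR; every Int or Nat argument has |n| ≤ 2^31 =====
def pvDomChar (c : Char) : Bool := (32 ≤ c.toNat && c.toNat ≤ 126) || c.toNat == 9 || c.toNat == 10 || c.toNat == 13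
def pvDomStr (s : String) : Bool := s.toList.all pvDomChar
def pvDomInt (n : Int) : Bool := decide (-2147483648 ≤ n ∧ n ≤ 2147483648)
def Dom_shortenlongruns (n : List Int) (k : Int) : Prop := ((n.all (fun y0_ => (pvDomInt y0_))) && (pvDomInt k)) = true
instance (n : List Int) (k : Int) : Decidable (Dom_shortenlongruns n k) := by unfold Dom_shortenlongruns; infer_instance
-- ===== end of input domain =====

-- B replaces A's quadratic pop-in-place scan by one linear pass that keeps an element only
-- while its current run length is ≤ k-1 (objective: faster). A mutates its argument in place;
-- B does not — the equivalence proved here is about the RETURN value only.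

-- ===== PORT A =====
-- inner 'for i in range(k)' loop computing c
def cCount (n : List Int) (z : Nat) (k : Int) : Int :=
  (PySem.List.pyRange 0 k 1).foldl
    (fun c i =>
      if (z : Int) + i < (n.length : Int) then
        if n.getD z 0 = n.getD (z + i.toNat) 0 then c + 1 else c
      else c) 0

-- the while loop; 'n.pop(z)' (z < len) is exactly 'n.eraseIdx z'
def goA (n : List Int) (z : Nat) (k : Int) : List Int :=
  if h : z < n.length then
    if cCount n z k = k then goA (n.eraseIdx z) z k
    else goA n (z + 1) k
  else n
termination_by 2 * n.length - z
decreasing_by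
  · simp [List.length_eraseIdx_of_lt h]; omega
  · omega

def shortenlongruns (n : List Int) (k : Int) : List Int :=
  if n = [] then [] else goA n 0 k

-- ===== PORT B =====
-- loop body of B's single pass: state = (out, run, prev)
def stepB (k : Int) (st : List Int × Int × Option Int) (x : Int) : List Int × Int × Option Int :=
  let run := if some x = st.2.2 then st.2.1 + 1 else 1
  (if run ≤ k - 1 then st.1 ++ [x] else st.1, run, some x)

def shortenlongruns_alt (n : List Int) (k : Int) : List Int :=
  (n.foldl (stepB k) ([], 0, none)).1

-- ===== PRECONDITION & SPEC =====
-- Pre_ excludes negative k, on which "truncate each run to length k-1" is meaningless and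
-- A's unchanged-input result vs B's empty result are both accidental corner choices.
def Pre_shortenlongruns (n : List Int) (k : Int) : Prop := 0 ≤ k
instance (n : List Int) (k : Int) : Decidable (Pre_shortenlongruns n k) := by unfold Pre_shortenlongruns; infer_instance
def pvWitness_shortenlongruns : List Int × Int := ([1, 1, 1, 2], 2)

def Spec_shortenlongruns (n : List Int) (k : Int) (out : List Int) : Prop := out = shortenlongruns_alt n k
instance (n : List Int) (k : Int) (out : List Int) : Decidable (Spec_shortenlongruns n k out) := by unfold Spec_shortenlongruns; infer_instance

-- ===== CLAIM (what is proved, stated in full; the proofs are below) =====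
def Claim_equal_shortenlongruns : Prop := ∀ (n : List Int) (k : Int), Dom_shortenlongruns n k → Pre_shortenlongruns n k → Spec_shortenlongruns n k (shortenlongruns n k)

-- ===== LEMMAS AND PROOFS =====

-- A's loop, seen list-structurally on the unprocessed suffix: pop the head iff the first k
-- elements all exist and equal it.
def F (k : Int) : List Int → List Int
  | [] => []
  | x :: rest =>
    if k.toNat ≤ rest.length + 1 ∧ ∀ j < k.toNat, (x :: rest).getD j 0 = x
    then F k rest
    else x :: F k rest

-- canonical run-by-run form: each maximal run of length L contributes min(L, k-1) copies
def C (k : Int) (l : List Int) : List Int :=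
  match l with
  | [] => []
  | x :: t =>
    List.replicate (min (((t.takeWhile (· == x)).length : Int) + 1) (k - 1)).toNat x
      ++ C k (t.dropWhile (· == x))
termination_by l.length
decreasing_by
  simpa using Nat.lt_succ_of_le (List.length_dropWhile_le (· == x) t)

lemma C_nil (k : Int) : C k [] = [] := by
  rw [C.eq_def]

lemma C_cons (k x : Int) (t : List Int) :
    C k (x :: t) =
      List.replicate (min (((t.takeWhile (· == x)).length : Int) + 1) (k - 1)).toNat x
        ++ C k (t.dropWhile (· == x)) := by
  rw [C.eq_def]

lemma getD_drop (n : List Int) (z j : Nat) (d : Int) :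
    (n.drop z).getD j d = n.getD (z + j) d := by
  simp [List.getD_eq_getElem?_getD, List.getElem?_drop]

lemma cCount_le (n : List Int) (z : Nat) (m : Nat) : cCount n z (m : Int) ≤ m := by
  induction m with
  | zero => simp [cCount, PySem.List.pyRange_one_eq_nil]
  | succ m ih =>
      have h : PySem.List.pyRange 0 ((m : Int) + 1) 1
          = PySem.List.pyRange 0 (m : Int) 1 ++ [(m : Int)] :=
        PySem.List.pyRange_one_succ_right (by positivity)
      push_cast
      simp only [cCount, h, List.foldl_append, List.foldl_cons, List.foldl_nil]
      simp only [cCount] at ih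
      split_ifs <;> push_cast <;> omega

lemma cCount_eq_iff (n : List Int) (z : Nat) (m : Nat) :
    cCount n z (m : Int) = m ↔
      ∀ j < m, (z : Int) + j < (n.length : Int) ∧ n.getD z 0 = n.getD (z + j) 0 := by
  induction m with
  | zero => simp [cCount, PySem.List.pyRange_one_eq_nil]
  | succ m ih =>
      have h : PySem.List.pyRange 0 ((m : Int) + 1) 1
          = PySem.List.pyRange 0 (m : Int) 1 ++ [(m : Int)] :=
        PySem.List.pyRange_one_succ_right (by positivity)
      have hle := cCount_le n z m
      constructor
      · intro hc
        have hsplit : cCount n z (m : Int) = m ∧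
            ((z : Int) + m < (n.length : Int) ∧ n.getD z 0 = n.getD (z + m) 0) := by
          push_cast at hc
          simp only [cCount, h, List.foldl_append, List.foldl_cons, List.foldl_nil] at hc
          simp only [cCount] at hle ⊢
          split_ifs at hc with h1 h2
          · exact ⟨by omega, h1, by simpa using h2⟩
          · omega
          · omega
        intro j hj
        rcases Nat.lt_succ_iff_lt_or_eq.1 hj with hj' | rfl
        · exact (ih.1 hsplit.1) j hj'
        · exact hsplit.2
      · intro hall
        have h1 : cCount n z (m : Int) = m :=
          ih.2 (fun j hj => hall j (Nat.lt_succ_of_lt hj))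
        have h2 := hall m (Nat.lt_succ_self m)
        push_cast
        simp only [cCount, h, List.foldl_append, List.foldl_cons, List.foldl_nil]
        simp only [cCount] at h1
        rw [h1]
        have : ((z : Int) + (m : Int) < (n.length : Int)) := h2.1
        rw [if_pos this, if_pos (by simpa using h2.2)]

-- the pop test of A at position z equals F's head test on the suffix n.drop z
lemma cond_iff (n : List Int) (z : Nat) (k : Int) (hk : 0 ≤ k) (hz : z < n.length)
    (x : Int) (rest : List Int) (hd : n.drop z = x :: rest) :
    cCount n z k = k ↔
      (k.toNat ≤ rest.length + 1 ∧ ∀ j < k.toNat, (x :: rest).getD j 0 = x) := by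
  have hx : x = n.getD z 0 := by
    have h := getD_drop n z 0 0
    rw [hd] at h
    simp only [List.getD_cons_zero, Nat.add_zero] at h
    exact h
  have hlen : rest.length + 1 = n.length - z := by
    have : (n.drop z).length = n.length - z := by simp
    rw [hd] at this; simpa using this
  have hk' : k = ((k.toNat : Nat) : Int) := by omega
  rw [hk', cCount_eq_iff]
  constructor
  · intro hall
    have hb : k.toNat ≤ rest.length + 1 := by
      rcases Nat.eq_zero_or_pos k.toNat with h0 | h0
      · omega
      · have := (hall (k.toNat - 1) (by omega)).1
        omega
    refine ⟨hb, fun j hj => ?_⟩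
    have := (hall j hj).2
    rw [← hd, getD_drop, hx]
    omega
  · rintro ⟨hb, hall⟩
    intro j hj
    refine ⟨by push_cast; omega, ?_⟩
    have hthis := hall j hj
    rw [← hd, getD_drop] at hthis
    rw [hthis, hx]

-- A's while loop never touches the processed prefix: characterisation by F
lemma goA_eq (k : Int) (hk : 0 ≤ k) (n : List Int) (z : Nat) :
    goA n z k = n.take z ++ F k (n.drop z) := by
  rw [goA]
  by_cases hz : z < n.length
  · rw [dif_pos hz]
    obtain ⟨x, rest, hd⟩ : ∃ x rest, n.drop z = x :: rest := by
      have : n.drop z ≠ [] := by simp; omega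
      cases h : n.drop z with
      | nil => exact absurd h this
      | cons a t => exact ⟨a, t, rfl⟩
    have hcond := cond_iff n z k hk hz x rest hd
    have hFd : F k (n.drop z) =
        if k.toNat ≤ rest.length + 1 ∧ ∀ j < k.toNat, (x :: rest).getD j 0 = x
        then F k rest else x :: F k rest := by
      rw [hd, F]
    by_cases hc : cCount n z k = k
    · rw [if_pos hc]
      have hrec := goA_eq k hk (n.eraseIdx z) z
      have he : n.eraseIdx z = n.take z ++ n.drop (z + 1) :=
        List.eraseIdx_eq_take_drop_succ n z
      have htk : (n.eraseIdx z).take z = n.take z := by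
        rw [he, List.take_append_of_le_length (by simp; omega), List.take_take]
        simp
      have hdp : (n.eraseIdx z).drop z = n.drop (z + 1) := by
        rw [he, List.drop_append_of_le_length (by simp; omega)]
        simp [List.drop_take]
      have hrest : n.drop (z + 1) = rest := by
        have : n.drop (z + 1) = (n.drop z).drop 1 := by
          rw [List.drop_drop]
        rw [this, hd]; simp
      rw [hrec, htk, hdp, hrest, hFd, if_pos (hcond.1 hc)]
    · rw [if_neg hc]
      have hrec := goA_eq k hk n (z + 1)
      have hrest : n.drop (z + 1) = rest := by
        have : n.drop (z + 1) = (n.drop z).drop 1 := by rw [List.drop_drop]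
        rw [this, hd]; simp
      have htk : n.take (z + 1) = n.take z ++ [x] := by
        have hx : n[z]? = some x := by
          have h : (n.drop z)[0]? = some x := by rw [hd]; rfl
          simpa using h
        rw [List.take_succ, hx]
        simp
      rw [hrec, htk, hrest, hFd, if_neg (fun h => hc (hcond.2 h))]
      simp
  · rw [dif_neg hz]
    have h1 : n.drop z = [] := by simp; omega
    have h2 : n.take z = n := by simp; omega
    rw [h1, h2, F]
    exact (List.append_nil n).symm
termination_by 2 * n.length - z
decreasing_by
  · simp [List.length_eraseIdx_of_lt hz]; omega
  · omega

-- F over one maximal run: keep min(L, k-1) copies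
lemma F_run (k : Int) (hk : 0 ≤ k) (x : Int) (L : Nat) (rest : List Int)
    (hrest : ∀ y, rest.head? = some y → y ≠ x) :
    F k (List.replicate L x ++ rest) =
      List.replicate (min ((L : Int)) (k - 1)).toNat x ++ F k rest := by
  induction L with
  | zero =>
      simp
  | succ L ih =>
      have hcons : List.replicate (L + 1) x ++ rest = x :: (List.replicate L x ++ rest) := by
        simp [List.replicate_succ]
      rw [hcons, F]
      have hcond : (k.toNat ≤ (List.replicate L x ++ rest).length + 1 ∧
          ∀ j < k.toNat, (x :: (List.replicate L x ++ rest)).getD j 0 = x) ↔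
          k.toNat ≤ L + 1 := by
        constructor
        · rintro ⟨hb, hall⟩
          by_contra hgt
          push_neg at hgt
          -- index L+1 is rest.head, which differs from x
          cases hr : rest with
          | nil => simp [hr] at hb; omega
          | cons y t =>
              have hy : y ≠ x := hrest y (by simp [hr])
              have := hall (L + 1) (by omega)
              have hidx : (x :: (List.replicate L x ++ rest)).getD (L + 1) 0 = y := by
                simp [hr, List.getD_eq_getElem?_getD, List.getElem?_append_right]
              exact hy (hidx ▸ this)
        · intro hle
          refine ⟨by simp; omega, fun j hj => ?_⟩
          rcases Nat.eq_zero_or_pos j with rfl | hj0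
          · simp
          · have hj' : j - 1 < L := by omega
            simp only [List.getD_eq_getElem?_getD]
            cases j with
            | zero => omega
            | succ j' =>
                simp only [List.getElem?_cons_succ]
                rw [List.getElem?_append_left (by simpa using by omega : j' < (List.replicate L x).length)]
                simp [List.getElem?_replicate, show j' < L by omega]
      by_cases hc : k.toNat ≤ L + 1
      · rw [if_pos (hcond.2 hc), ih]
        have : (min ((L : Int) + 1) (k - 1)).toNat = (min ((L : Int)) (k - 1)).toNat := by
          omega
        rw [show ((L + 1 : Nat) : Int) = (L : Int) + 1 by push_cast; ring, this]
      · rw [if_neg (fun h => hc (hcond.1 h)), ih]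
        have h1 : (min (((L : Nat) + 1 : Nat) : Int) (k - 1)).toNat = L + 1 := by
          push_cast; omega
        have h2 : (min ((L : Int)) (k - 1)).toNat = L := by omega
        rw [h1, h2]
        simp [List.replicate_succ]

lemma takeWhile_eq_replicate (x : Int) (t : List Int) :
    t.takeWhile (· == x) = List.replicate (t.takeWhile (· == x)).length x := by
  apply List.eq_replicate_of_mem
  intro b hb
  have := List.mem_takeWhile_imp hb
  simpa using this

lemma head_dropWhile_ne (x : Int) (t : List Int) :
    ∀ y, (t.dropWhile (· == x)).head? = some y → y ≠ x := by
  intro y hy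
  have := List.head?_dropWhile_not (· == x) t
  rw [hy] at this
  simpa using this

lemma F_eq_C (k : Int) (hk : 0 ≤ k) (l : List Int) : F k l = C k l := by
  cases l with
  | nil => rw [F, C]
  | cons x t =>
      have hsplit : x :: t = List.replicate ((t.takeWhile (· == x)).length + 1) x
          ++ t.dropWhile (· == x) := by
        rw [List.replicate_succ, List.cons_append, ← takeWhile_eq_replicate x t,
          List.takeWhile_append_dropWhile]
      rw [C_cons]
      conv_lhs => rw [hsplit]
      rw [F_run k hk x _ _ (head_dropWhile_ne x t)]
      have hrec : F k (t.dropWhile (· == x)) = C k (t.dropWhile (· == x)) :=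
        F_eq_C k hk (t.dropWhile (· == x))
      rw [hrec,
        show ((((t.takeWhile (· == x)).length + 1 : Nat)) : Int)
            = ((t.takeWhile (· == x)).length : Int) + 1 by push_cast; ring]
termination_by l.length
decreasing_by
  simpa using Nat.lt_succ_of_le (List.length_dropWhile_le (· == x) t)

-- B's fold over one maximal run, entered with current run length r
lemma fold_run (k x : Int) (m : Nat) (out : List Int) (r : Int) :
    List.foldl (stepB k) (out, r, some x) (List.replicate m x) =
      (out ++ List.replicate (min ((m : Int)) (k - 1 - r)).toNat x, r + m, some x) := by
  induction m generalizing out r with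
  | zero =>
      have h0 : (min ((0 : Int)) (k - 1 - r)).toNat = 0 := by omega
      simp [h0]
      all_goals omega
  | succ m ih =>
      rw [List.replicate_succ, List.foldl_cons]
      have hstep : stepB k (out, r, some x) x =
          (if r + 1 ≤ k - 1 then out ++ [x] else out, r + 1, some x) := by
        simp [stepB]
      rw [hstep, ih]
      by_cases hc : r + 1 ≤ k - 1
      · rw [if_pos hc]
        have hmin : (min (((m : Nat) + 1 : Nat) : Int) (k - 1 - r)).toNat
            = (min ((m : Int)) (k - 1 - (r + 1))).toNat + 1 := by
          push_cast; omega
        rw [hmin]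
        simp [Prod.ext_iff, List.append_assoc, List.replicate_succ]
        all_goals omega
      · rw [if_neg hc]
        have h1 : (min (((m : Nat) + 1 : Nat) : Int) (k - 1 - r)).toNat = 0 := by
          push_cast; omega
        have h2 : (min ((m : Int)) (k - 1 - (r + 1))).toNat = 0 := by omega
        rw [h1, h2]
        simp [Prod.ext_iff]
        all_goals omega

-- B's fold from any run boundary produces C
lemma foldB_eq (k : Int) (l : List Int) : ∀ (out : List Int) (r : Int) (p : Option Int),
    (∀ y, l.head? = some y → p ≠ some y) →
    (List.foldl (stepB k) (out, r, p) l).1 = out ++ C k l := by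
  cases l with
  | nil => intro out r p _; simp [C]
  | cons x t =>
      intro out r p hp
      have hpx : p ≠ some x := hp x (by simp)
      rw [List.foldl_cons]
      have hstep : stepB k (out, r, p) x =
          (if 1 ≤ k - 1 then out ++ [x] else out, 1, some x) := by
        have h1 : (if some x = p then r + 1 else 1) = 1 := if_neg (fun h => hpx h.symm)
        simp [stepB, h1]
      rw [hstep]
      have hsplit : t = t.takeWhile (· == x) ++ t.dropWhile (· == x) :=
        (List.takeWhile_append_dropWhile).symm
      rw [C_cons]
      conv_lhs => rw [hsplit, List.foldl_append, takeWhile_eq_replicate x t, fold_run]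
      have hrec := foldB_eq k (t.dropWhile (· == x))
        ((if 1 ≤ k - 1 then out ++ [x] else out) ++
          List.replicate (min (((t.takeWhile (· == x)).length : Int)) (k - 1 - 1)).toNat x)
        (1 + ((t.takeWhile (· == x)).length : Int)) (some x)
        (by intro y hy h; exact head_dropWhile_ne x t y hy (by injection h with h'; exact h'.symm ▸ rfl))
      rw [hrec]
      set L := (t.takeWhile (· == x)).length with hL
      by_cases hc : 1 ≤ k - 1
      · rw [if_pos hc]
        have hmin : (min ((L : Int) + 1) (k - 1)).toNat
            = (min ((L : Int)) (k - 1 - 1)).toNat + 1 := by omega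
        rw [hmin]
        simp [List.append_assoc, List.replicate_succ]
      · rw [if_neg hc]
        have h1 : (min ((L : Int) + 1) (k - 1)).toNat = 0 := by omega
        have h2 : (min ((L : Int)) (k - 1 - 1)).toNat = 0 := by omega
        rw [h1, h2]
        simp
termination_by l.length
decreasing_by
  simpa using Nat.lt_succ_of_le (List.length_dropWhile_le (· == x) t)

-- ===== VERDICT (by name: the statement is the Claim_ definition above) =====
theorem shortenlongruns_spec : Claim_equal_shortenlongruns := by
  intro n k _ hk
  unfold Spec_shortenlongruns shortenlongruns shortenlongruns_alt
  have hB : (List.foldl (stepB k) ([], 0, none) n).1 = C k n :=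
    foldB_eq k n [] 0 none (by intro y _ h; cases h)
  by_cases hn : n = []
  · subst hn
    rw [if_pos rfl, hB, C_nil]
  · rw [if_neg hn, goA_eq k hk n 0, hB]
    simpa using F_eq_C k hk n
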